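-- pv_equiv track=rewrite | github.com/RagtagOpen/marchon-map | lambda/action_network.py | get_email_address_from_organizer
-- ===== SOURCE A (Python) =====
-- from typing import Dict
--
-- def get_email_address_from_organizer(organizer: Dict) -> str:
--     email_addresses = organizer.get('email_addresses', {})
--     next_best_email_address = ''
--     for this_email_address in email_addresses:
--         address = this_email_address.get('address')
--         if this_email_address.get('primary'):
--             return address
--         elif not next_best_email_address:
--             next_best_email_address = address
--
--     return next_best_email_address
-- ===== SOURCE B (Python) =====
-- def get_email_address_from_organizer(organizer):
--     email_addresses = organizer.get('email_addresses', {})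
--     # pass 1: a primary email wins outright
--     for e in email_addresses:
--         if e.get('primary'):
--             return e.get('address')
--     # pass 2: first truthy address, else ''
--     return next((e.get('address') for e in email_addresses if e.get('address')), '')
-- ===== Notes on version B (the rewrite author's own statement) =====
-- stated objective: idiomatic
-- what changed: Replaced the single loop with a 'next_best' accumulator by two separate passes: one that returns the first primary's address directly, and a next(...) expression picking the first truthy address as the fallback.
-- outside the precondition, e.g. on get_email_address_from_organizer({'email_addresses': [{'x': 'y'}]}): A returns None, B returns ''; on get_email_address_from_organizer({'email_addresses': [{'primary': '1'}]}): A returns None, B returns None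
import Mathlib
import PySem

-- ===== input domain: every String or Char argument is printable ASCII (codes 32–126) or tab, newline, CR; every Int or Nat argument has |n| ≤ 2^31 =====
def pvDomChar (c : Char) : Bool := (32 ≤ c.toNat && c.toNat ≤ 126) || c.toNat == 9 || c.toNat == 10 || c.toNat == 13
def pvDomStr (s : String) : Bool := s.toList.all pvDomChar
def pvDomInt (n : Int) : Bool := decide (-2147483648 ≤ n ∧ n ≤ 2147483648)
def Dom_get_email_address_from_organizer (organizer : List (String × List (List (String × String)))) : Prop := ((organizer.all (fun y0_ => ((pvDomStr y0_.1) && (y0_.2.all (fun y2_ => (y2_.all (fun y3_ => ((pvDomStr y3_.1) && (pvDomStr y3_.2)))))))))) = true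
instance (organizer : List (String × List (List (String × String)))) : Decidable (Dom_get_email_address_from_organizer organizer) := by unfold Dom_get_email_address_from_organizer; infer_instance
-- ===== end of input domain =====

-- B replaces A's single accumulator loop by two passes (primary first, then first truthy address); idiomatic, same cost.
-- Equivalence is about the RETURN value; inputs where Python A returns None (not a str) are excluded by Pre_.

-- d.get(k) on a dict[str,str] represented as an association list (first match)
def pvGetS (d : List (String × String)) (k : String) : Option String :=
  (d.find? (fun p => p.1 = k)).map (·.2)

-- truthiness of d.get(k): key present with a nonempty string
def pvTruthy (o : Option String) : Bool :=
  match o with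
  | some s => s ≠ ""
  | none => false

-- organizer.get('email_addresses', {})
def pvEmails (organizer : List (String × List (List (String × String)))) : List (List (String × String)) :=
  ((organizer.find? (fun p => p.1 = "email_addresses")).map (·.2)).getD []

-- ===== PORT A =====
-- A's loop with the next_best_email_address accumulator. Where Python returns/stores None,
-- the port uses "" (excluded by Pre_ for the return; as loop state, None and "" are equally falsy).
def pvLoopA (es : List (List (String × String))) (next_best : String) : String :=
  match es with
  | [] => next_best
  | e :: rest =>
    let address := (pvGetS e "address").getD ""
    if pvTruthy (pvGetS e "primary") then address
    else if next_best = "" then pvLoopA rest address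
    else pvLoopA rest next_best

def get_email_address_from_organizer (organizer : List (String × List (List (String × String)))) : String :=
  pvLoopA (pvEmails organizer) ""

-- ===== PORT B =====
-- two passes: return the first primary's address; else the first truthy address; else ''
def get_email_address_from_organizer_alt (organizer : List (String × List (List (String × String)))) : String :=
  let emails := pvEmails organizer
  match emails.find? (fun e => pvTruthy (pvGetS e "primary")) with
  | some e => (pvGetS e "address").getD ""
  | none =>
    match emails.find? (fun e => pvTruthy (pvGetS e "address")) with
    | some e => (pvGetS e "address").getD ""
    | none => ""

-- ===== PRECONDITION & SPEC =====
-- Pre_ excludes exactly the inputs on which Python A returns None instead of a str: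
-- a first primary email without an 'address' key, or (no primary, no truthy address) a
-- nonempty email list whose last entry lacks the 'address' key.
def Pre_get_email_address_from_organizer (organizer : List (String × List (List (String × String)))) : Prop :=
  (let emails := pvEmails organizer
   match emails.find? (fun e => pvTruthy (pvGetS e "primary")) with
   | some e => (pvGetS e "address").isSome
   | none =>
     emails.any (fun e => pvTruthy (pvGetS e "address")) ||
     (match emails.getLast? with
      | some e => (pvGetS e "address").isSome
      | none => true)) = true
instance (organizer : List (String × List (List (String × String)))) : Decidable (Pre_get_email_address_from_organizer organizer) := by unfold Pre_get_email_address_from_organizer; infer_instance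

def pvWitness_get_email_address_from_organizer : (List (String × List (List (String × String)))) :=
  [("email_addresses", [[("address", "")], [("address", "a@b.c"), ("primary", "1")]])]

def Spec_get_email_address_from_organizer (organizer : List (String × List (List (String × String)))) (out : String) : Prop := out = get_email_address_from_organizer_alt organizer
instance (organizer : List (String × List (List (String × String)))) (out : String) : Decidable (Spec_get_email_address_from_organizer organizer out) := by unfold Spec_get_email_address_from_organizer; infer_instance

-- ===== CLAIM (what is proved, stated in full; the proofs are below) =====
def Claim_equal_get_email_address_from_organizer : Prop := ∀ (organizer : List (String × List (List (String × String)))), Dom_get_email_address_from_organizer organizer → Pre_get_email_address_from_organizer organizer → Spec_get_email_address_from_organizer organizer (get_email_address_from_organizer organizer)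

-- ===== LEMMAS AND PROOFS =====

-- Characterisation of A's loop: the first primary wins regardless of the accumulator;
-- otherwise a nonempty accumulator is returned unchanged, and an empty one picks up the
-- first truthy address (falsy addresses collapse to "" in the port, so the guard keeps firing).
theorem pvLoopA_eq (es : List (List (String × String))) (nb : String) :
    pvLoopA es nb =
      match es.find? (fun e => pvTruthy (pvGetS e "primary")) with
      | some e => (pvGetS e "address").getD ""
      | none =>
        if nb = "" then
          match es.find? (fun e => pvTruthy (pvGetS e "address")) with
          | some e => (pvGetS e "address").getD ""
          | none => ""
        else nb := by
  induction es generalizing nb with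
  | nil => simp [pvLoopA]
  | cons e rest ih =>
    by_cases hp : pvTruthy (pvGetS e "primary")
    · simp [pvLoopA, List.find?_cons, hp]
    · by_cases ha : pvTruthy (pvGetS e "address")
      · by_cases hnb : nb = ""
        · have haddr : (pvGetS e "address").getD "" ≠ "" := by
            cases h : pvGetS e "address" with
            | none => simp [pvTruthy, h] at ha
            | some s => simpa [pvTruthy, h] using ha
          simp [pvLoopA, List.find?_cons, hp, ha, hnb, ih, haddr]
        · simp [pvLoopA, List.find?_cons, hp, ha, hnb, ih]
      · have haddr : (pvGetS e "address").getD "" = "" := by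
          cases h : pvGetS e "address" with
          | none => simp
          | some s => simpa [pvTruthy, h] using ha
        by_cases hnb : nb = ""
        · simp [pvLoopA, List.find?_cons, hp, ha, hnb, haddr, ih]
        · simp [pvLoopA, List.find?_cons, hp, ha, hnb, ih]

-- ===== VERDICT (by name: the statement is the Claim_ definition above) =====
theorem get_email_address_from_organizer_spec : Claim_equal_get_email_address_from_organizer := by
  intro organizer _ _
  unfold Spec_get_email_address_from_organizer
  unfold get_email_address_from_organizer get_email_address_from_organizer_alt
  rw [pvLoopA_eq]
  simp
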